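-- pv_equiv track=rewrite | github.com/joshanashakya/dissertation | workspace/dataset/java-python/GeeksForGeeks/4338/A/2.py | submatrixXor
-- ===== SOURCE A (Python) =====
-- def submatrixXor(arr, n):
--
--     ans = 0
--
--     # Nested loop to find the
--     # number of sub-matrix each
--     # index belongs to
--     for i in range(0, n):
--         for j in range(0, n):
--
--             # Number of ways to choose
--             # from top-left elements
--             top_left = (i + 1) * (j + 1)
--
--             # Number of ways to choose
--             # from bottom-right elements
--             bottom_right = (n - i) * (n - j)
--             if (top_left % 2 == 1 and
--                 bottom_right % 2 == 1):
--                 ans = (ans ^ arr[i][j])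
--     return ans
-- ===== SOURCE B (Python) =====
-- def _every_other(xs):
--     # xs[::2] computed by structural recursion
--     if not xs:
--         return []
--     return [xs[0]] + _every_other(xs[2:])
--
--
-- def submatrixXor(arr, n):
--     # A cell is in an odd number of submatrices exactly when n is odd and its
--     # row and column indices are both even; so slice out every other row/value.
--     if n <= 0 or n % 2 == 0:
--         return 0
--     ans = 0
--     for row in _every_other(arr[:n]):
--         for v in _every_other(row[:n]):
--             ans ^= v
--     return ans
-- ===== Notes on version B (the rewrite author's own statement) =====
-- stated objective: simpler
-- what changed: B replaces A's per-cell (i+1)(j+1)/(n-i)(n-j) parity tests over all n^2 indexed cells by an even-n/nonpositive-n early return plus iteration over the data itself: it slices arr[:n], keeps every other row and every other value via a recursive helper, and XORs those values with no index arithmetic at all.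
import Mathlib
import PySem

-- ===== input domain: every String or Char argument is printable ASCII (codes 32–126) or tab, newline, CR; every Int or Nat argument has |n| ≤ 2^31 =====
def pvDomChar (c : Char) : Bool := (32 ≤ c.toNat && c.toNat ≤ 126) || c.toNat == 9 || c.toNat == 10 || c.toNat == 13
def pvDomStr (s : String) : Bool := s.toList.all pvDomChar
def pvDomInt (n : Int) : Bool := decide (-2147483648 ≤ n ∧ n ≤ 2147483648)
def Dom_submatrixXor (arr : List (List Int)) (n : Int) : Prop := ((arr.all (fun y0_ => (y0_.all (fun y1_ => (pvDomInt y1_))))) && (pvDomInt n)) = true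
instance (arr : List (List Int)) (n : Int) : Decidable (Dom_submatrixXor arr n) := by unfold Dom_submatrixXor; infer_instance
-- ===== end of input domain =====

-- B replaces A's per-cell parity arithmetic by an even/nonpositive-n early return plus
-- slicing out every other row and value with a recursive helper (simpler; return-value
-- equivalence, no argument is mutated).


-- ===== PORT A =====
def submatrixXor (arr : List (List Int)) (n : Int) : Int :=
  (PySem.List.pyRange 0 n 1).foldl (fun ans i =>
    (PySem.List.pyRange 0 n 1).foldl (fun ans j =>
      -- top_left = (i+1)*(j+1), bottom_right = (n-i)*(n-j)
      if PySem.Int.mod ((i + 1) * (j + 1)) 2 = 1 ∧ PySem.Int.mod ((n - i) * (n - j)) 2 = 1 then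
        PySem.Int.bxor ans (PySem.List.pyGetD (PySem.List.pyGetD arr i []) j 0)  -- arr[i][j]; in range under Pre_
      else ans) ans) 0

-- ===== PORT B =====
-- _every_other(xs): xs[::2] by structural recursion ([xs[0]] + _every_other(xs[2:]))
def pvEveryOther {α : Type} : List α → List α
  | [] => []
  | [x] => [x]
  | x :: _ :: rest => x :: pvEveryOther rest

def submatrixXor_alt (arr : List (List Int)) (n : Int) : Int :=
  if n ≤ 0 ∨ PySem.Int.mod n 2 = 0 then 0
  else
    (pvEveryOther (PySem.List.slice arr none (some n))).foldl (fun ans row =>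
      (pvEveryOther (PySem.List.slice row none (some n))).foldl (fun ans v =>
        PySem.Int.bxor ans v) ans) 0

-- ===== PRECONDITION & SPEC =====
-- When n is odd and positive, Python A reads arr[i][j] for even i, j < n (IndexError
-- otherwise); Pre_ requires a full n×n prefix then (slightly wider than the exact
-- accessed set — rows/columns at odd indices need not exist for Python to return,
-- but the natural shape condition is the full square).
def Pre_submatrixXor (arr : List (List Int)) (n : Int) : Prop :=
  PySem.Int.mod n 2 = 1 → (n ≤ arr.length ∧ ∀ r ∈ arr, n ≤ (r.length : Int))
instance (arr : List (List Int)) (n : Int) : Decidable (Pre_submatrixXor arr n) := by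
  unfold Pre_submatrixXor; infer_instance
def pvWitness_submatrixXor : List (List Int) × Int := ([[1, 2, 3], [4, 5, 6], [7, 8, 9]], 3)

def Spec_submatrixXor (arr : List (List Int)) (n : Int) (out : Int) : Prop := out = submatrixXor_alt arr n
instance (arr : List (List Int)) (n : Int) (out : Int) : Decidable (Spec_submatrixXor arr n out) := by unfold Spec_submatrixXor; infer_instance

-- ===== CLAIM (what is proved, stated in full; the proofs are below) =====
def Claim_equal_submatrixXor : Prop := ∀ (arr : List (List Int)) (n : Int), Dom_submatrixXor arr n → Pre_submatrixXor arr n → Spec_submatrixXor arr n (submatrixXor arr n)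

-- ===== LEMMAS AND PROOFS =====

-- An integer product is odd iff both factors are odd.
theorem pv_mul_emod_two (a b : Int) : (a * b) % 2 = 1 ↔ a % 2 = 1 ∧ b % 2 = 1 := by
  rw [Int.mul_emod]
  rcases Int.emod_two_eq a with h | h <;> rcases Int.emod_two_eq b with h' | h' <;>
    simp [h, h']

-- A's per-cell condition, characterised: it holds iff n is odd and i, j are both even.
theorem pv_cond_iff (n i j : Int) :
    (PySem.Int.mod ((i + 1) * (j + 1)) 2 = 1 ∧ PySem.Int.mod ((n - i) * (n - j)) 2 = 1) ↔
    (n % 2 = 1 ∧ i % 2 = 0 ∧ j % 2 = 0) := by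
  simp only [PySem.Int.mod_eq_emod_of_pos (by norm_num : (0:Int) < 2)]
  rw [pv_mul_emod_two, pv_mul_emod_two]
  omega

-- Even members of range m, as a stride-2 list.
theorem pv_range_filter_even (m : Nat) :
    (List.range m).filter (fun k => decide (k % 2 = 0)) =
    (List.range ((m + 1) / 2)).map (fun k => 2 * k) := by
  induction m with
  | zero => simp
  | succ m ih =>
    rw [List.range_succ, List.filter_append, ih]
    rcases Nat.even_or_odd m with hm | hm
    · obtain ⟨c, hc⟩ := hm
      have h2 : (m + 1) / 2 = c := by omega
      have h1 : (m + 1 + 1) / 2 = c + 1 := by omega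
      rw [h2, h1, List.range_succ, List.map_append]
      have hm0 : m % 2 = 0 := by omega
      simp [List.filter, hm0]
      omega
    · obtain ⟨c, hc⟩ := hm
      have h1 : (m + 1 + 1) / 2 = (m + 1) / 2 := by omega
      rw [h1]
      have hm1 : ¬ m % 2 = 0 := by omega
      simp [List.filter, hm1]

-- The even members of range(0, n), in order, are exactly range(0, n, 2).
theorem pv_pyRange_filter_even (n : Int) :
    (PySem.List.pyRange 0 n 1).filter (fun x => decide (x % 2 = 0)) =
    PySem.List.pyRange 0 n 2 := by
  rw [PySem.List.pyRange_one, PySem.List.pyRange_of_pos 0 n (by norm_num : (0:Int) < 2),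
    List.filter_map]
  simp only [sub_zero, zero_add]
  by_cases hn : (0:Int) < n
  · rw [if_pos hn]
    rw [List.filter_congr (fun k (_ : k ∈ List.range n.toNat) => by
      simp only [Function.comp_apply, decide_eq_decide]
      omega : ∀ k ∈ List.range n.toNat, ((fun x => decide (x % 2 = 0)) ∘ (fun k : Nat => (k : Int))) k = decide (k % 2 = 0))]
    rw [pv_range_filter_even, List.map_map]
    have hlen : (n.toNat + 1) / 2 = ((n + 2 - 1) / 2).toNat := by omega
    rw [hlen]
    apply List.map_congr_left
    intro k _
    simp only [Function.comp_apply]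
    push_cast
    ring
  · rw [if_neg hn]
    have h1 : n ≤ 0 := by omega
    simp [Int.toNat_of_nonpos h1]

-- range(0, n, 2) as the casts of 2*k for k < (n.toNat+1)/2.
theorem pv_pyRange_two (n : Int) :
    PySem.List.pyRange 0 n 2 =
    (List.range ((n.toNat + 1) / 2)).map (fun k => ((2 * k : Nat) : Int)) := by
  rw [← pv_pyRange_filter_even, PySem.List.pyRange_one, List.filter_map]
  simp only [sub_zero, zero_add]
  rw [List.filter_congr (fun k (_ : k ∈ List.range n.toNat) => by
    simp only [Function.comp_apply, decide_eq_decide]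
    omega : ∀ k ∈ List.range n.toNat, ((fun x => decide (x % 2 = 0)) ∘ (fun k : Nat => (k : Int))) k = decide (k % 2 = 0))]
  rw [pv_range_filter_even, List.map_map]
  rfl

-- foldl of a conditional body is foldl of the then-body over the filtered list (Prop test).
theorem pv_foldl_ite_filter {α : Type} (p : Int → Prop) [DecidablePred p]
    (f : α → Int → α) (l : List Int) (init : α) :
    l.foldl (fun acc x => if p x then f acc x else acc) init =
    (l.filter (fun x => decide (p x))).foldl f init := by
  induction l generalizing init with
  | nil => rfl
  | cons x xs ih =>
    by_cases hx : p x <;> simp [hx, ih]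

-- For odd n, A is the stride-2 double fold over even indices.
theorem pv_A_stride (arr : List (List Int)) (n : Int) (hn : n % 2 = 1) :
    submatrixXor arr n =
    (PySem.List.pyRange 0 n 2).foldl (fun ans i =>
      (PySem.List.pyRange 0 n 2).foldl (fun ans j =>
        PySem.Int.bxor ans (PySem.List.pyGetD (PySem.List.pyGetD arr i []) j 0)) ans) 0 := by
  unfold submatrixXor
  refine Eq.trans (PySem.List.foldl_congr_mem _ _
    (fun ans i => if i % 2 = 0 then
      (PySem.List.pyRange 0 n 2).foldl (fun ans j =>
        PySem.Int.bxor ans (PySem.List.pyGetD (PySem.List.pyGetD arr i []) j 0)) ans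
    else ans) 0 ?_) ?_
  · intro acc i _
    dsimp only
    by_cases hi : i % 2 = 0
    · rw [if_pos hi]
      refine Eq.trans (PySem.List.foldl_congr_mem _ _
        (fun ans j => if j % 2 = 0 then
          PySem.Int.bxor ans (PySem.List.pyGetD (PySem.List.pyGetD arr i []) j 0)
        else ans) acc ?_) ?_
      · intro acc' j _
        dsimp only
        by_cases hj : j % 2 = 0
        · rw [if_pos ((pv_cond_iff n i j).mpr ⟨hn, hi, hj⟩), if_pos hj]
        · rw [if_neg (by rw [pv_cond_iff]; tauto), if_neg hj]
      · rw [pv_foldl_ite_filter (fun j => j % 2 = 0), pv_pyRange_filter_even]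
    · rw [if_neg hi]
      refine Eq.trans (PySem.List.foldl_congr_mem _ _ (fun ans _ => ans) acc ?_)
        (List.foldl_fixed _)
      intro acc' j _
      rw [if_neg (by rw [pv_cond_iff]; tauto)]
  · rw [pv_foldl_ite_filter (fun i => i % 2 = 0), pv_pyRange_filter_even]

-- Every other element of a length-≥ m prefix, as the stride-2 getD list.
theorem pv_eo_take {α : Type} (d : α) :
    ∀ (m : Nat) (l : List α), m ≤ l.length →
      pvEveryOther (l.take m) =
      (List.range ((m + 1) / 2)).map (fun k => l.getD (2 * k) d) := by
  intro m
  induction m using Nat.strong_induction_on with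
  | _ m ih =>
    intro l hl
    match m, l with
    | 0, l => simp [pvEveryOther]
    | 1, [] => simp at hl
    | 1, a :: l => simp [pvEveryOther, List.range_succ]
    | (m + 2), [] => simp at hl
    | (m + 2), [a] => simp at hl
    | (m + 2), a :: b :: l =>
      have hrec := ih m (by omega) l (by simpa using hl)
      have hs : (m + 2 + 1) / 2 = (m + 1) / 2 + 1 := by omega
      rw [List.take_succ_cons, List.take_succ_cons, pvEveryOther, hrec, hs,
        List.range_succ_eq_map, List.map_cons, List.map_map]
      simp [Function.comp, Nat.mul_succ]

-- ===== VERDICT proof core: the two ports agree under Pre_ =====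
theorem pv_ports_eq (arr : List (List Int)) (n : Int)
    (hpre : PySem.Int.mod n 2 = 1 → (n ≤ arr.length ∧ ∀ r ∈ arr, n ≤ (r.length : Int))) :
    submatrixXor arr n = submatrixXor_alt arr n := by
  have hn2 : PySem.Int.mod n 2 = n % 2 := PySem.Int.mod_eq_emod_of_pos (by norm_num)
  rcases Int.emod_two_eq n with hn | hn
  · -- n even: A's condition never holds, both sides are 0
    unfold submatrixXor submatrixXor_alt
    rw [if_pos (Or.inr (by rw [hn2, hn]))]
    refine Eq.trans (PySem.List.foldl_congr_mem _ _ (fun ans _ => ans) 0 ?_) (List.foldl_fixed _)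
    intro acc i _
    refine Eq.trans (PySem.List.foldl_congr_mem _ _ (fun ans _ => ans) acc ?_) (List.foldl_fixed _)
    intro acc' j _
    rw [if_neg (by rw [pv_cond_iff]; omega)]
  · by_cases hpos : n ≤ 0
    · -- n odd nonpositive: A's range is empty, B's early return fires
      unfold submatrixXor submatrixXor_alt
      rw [if_pos (Or.inl hpos), PySem.List.pyRange_one_eq_nil (by omega)]
      rfl
    · -- n odd positive: both are the double fold over even rows/columns of the n×n prefix
      rw [not_le] at hpos
      obtain ⟨hlen, hrows⟩ := hpre (by rw [hn2, hn])
      rw [pv_A_stride arr n hn]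
      unfold submatrixXor_alt
      rw [if_neg (by rw [hn2, hn]; omega)]
      rw [PySem.List.slice_to arr (by omega : (0:Int) ≤ n),
        pv_eo_take ([] : List Int) n.toNat arr (by omega), pv_pyRange_two,
        List.foldl_map, List.foldl_map]
      refine PySem.List.foldl_congr_mem _ _ _ 0 ?_
      intro acc k hk
      have hk2 : 2 * k < n.toNat := by
        simp only [List.mem_range] at hk; omega
      have hrowmem : arr.getD (2 * k) [] ∈ arr := by
        rw [List.getD_eq_getElem arr [] (by omega)]
        exact List.getElem_mem _
      have hrowlen : n ≤ ((arr.getD (2 * k) []).length : Int) := hrows _ hrowmem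
      rw [PySem.List.pyGetD_natCast,
        PySem.List.slice_to (arr.getD (2 * k) []) (by omega : (0:Int) ≤ n),
        pv_eo_take (0 : Int) n.toNat (arr.getD (2 * k) []) (by omega),
        List.foldl_map, List.foldl_map]
      refine PySem.List.foldl_congr_mem _ _ _ acc ?_
      intro acc' k' _
      rw [PySem.List.pyGetD_natCast]

-- ===== VERDICT (by name: the statement is the Claim_ definition above) =====
theorem submatrixXor_spec : Claim_equal_submatrixXor := by
  intro arr n _ hpre
  exact pv_ports_eq arr n hpre
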